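-- pv_equiv track=rewrite | github.com/Egraf99/Running_line | symbols.py | from_up_and_bottom_to_center_and_center
-- ===== SOURCE A (Python) =====
-- def from_up_and_bottom_to_center_and_center(pix_column: list, height: int, symbol_id, order_col) -> list:
--     if height > order_col > (height // 2):
--         for h in range(height):
--             if h == ((height // 2) - (height - order_col)):
--                 pix_column.append(symbol_id[0])
--             elif h == ((height // 2) + (height - order_col)):
--                 pix_column.append(symbol_id[1])
--             elif h == height // 2:
--                 pix_column.append(symbol_id[2])
--             else:
--                 pix_column.append(0)
--         return pix_column
-- ===== SOURCE B (Python) =====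
-- def from_up_and_bottom_to_center_and_center(pix_column: list, height: int, symbol_id, order_col) -> list:
--     if height > order_col > (height // 2):
--         c = height // 2
--         d = height - order_col
--         col = [0] * height
--         col[c - d] = symbol_id[0]
--         col[c] = symbol_id[2]
--         col[c + d] = symbol_id[1]
--         pix_column.extend(col)
--         return pix_column
-- ===== Notes on version B (the rewrite author's own statement) =====
-- stated objective: simpler
-- what changed: Instead of scanning every row index and testing it against the three target positions, B computes the three positions in closed form, allocates a zero column with [0]*height, writes the three symbols by direct index assignment, and extends pix_column with it.
-- outside the precondition, e.g. on from_up_and_bottom_to_center_and_center([], 5, [7], 4): A raises IndexError, B raises IndexError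
import Mathlib
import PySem

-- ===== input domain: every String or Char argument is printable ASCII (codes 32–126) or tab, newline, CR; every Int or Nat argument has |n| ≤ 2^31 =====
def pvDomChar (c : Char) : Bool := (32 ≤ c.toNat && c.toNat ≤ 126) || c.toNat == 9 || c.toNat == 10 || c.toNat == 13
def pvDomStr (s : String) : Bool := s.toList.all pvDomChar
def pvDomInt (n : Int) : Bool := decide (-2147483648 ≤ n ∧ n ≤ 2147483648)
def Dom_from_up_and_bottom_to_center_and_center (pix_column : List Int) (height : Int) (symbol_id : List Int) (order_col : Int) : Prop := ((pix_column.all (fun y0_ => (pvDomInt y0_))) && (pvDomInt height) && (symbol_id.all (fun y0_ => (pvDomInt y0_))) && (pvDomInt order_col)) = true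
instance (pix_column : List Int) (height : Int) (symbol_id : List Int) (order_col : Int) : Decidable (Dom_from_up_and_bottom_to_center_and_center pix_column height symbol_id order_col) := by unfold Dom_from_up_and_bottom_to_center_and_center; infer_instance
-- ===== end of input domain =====

-- B replaces A's per-row conditional scan by a direct scatter-write into a zero column (simpler);
-- both A and B mutate pix_column in place the same way (append/extend of the same elements);
-- the equivalence proved is about the return value.

-- ===== PORT A =====
def from_up_and_bottom_to_center_and_center (pix_column : List Int) (height : Int) (symbol_id : List Int) (order_col : Int) : Option (List Int) :=
  if height > order_col ∧ order_col > PySem.Int.floordiv height 2 then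
    -- for h in range(height): append per the if/elif chain; symbol_id[k] via pyGetD (Pre_ excludes the IndexError)
    some ((PySem.List.pyRange 0 height 1).foldl (fun acc h =>
      if h = PySem.Int.floordiv height 2 - (height - order_col) then
        acc ++ [PySem.List.pyGetD symbol_id 0 0]
      else if h = PySem.Int.floordiv height 2 + (height - order_col) then
        acc ++ [PySem.List.pyGetD symbol_id 1 0]
      else if h = PySem.Int.floordiv height 2 then
        acc ++ [PySem.List.pyGetD symbol_id 2 0]
      else
        acc ++ [0]) pix_column)
  else none

-- ===== PORT B =====
def from_up_and_bottom_to_center_and_center_alt (pix_column : List Int) (height : Int) (symbol_id : List Int) (order_col : Int) : Option (List Int) :=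
  if height > order_col ∧ order_col > PySem.Int.floordiv height 2 then
    let c := PySem.Int.floordiv height 2
    let d := height - order_col
    let col0 := List.replicate height.toNat (0 : Int)             -- [0] * height
    let col1 := PySem.List.pySetD col0 (c - d) (PySem.List.pyGetD symbol_id 0 0)   -- col[c-d] = symbol_id[0]
    let col2 := PySem.List.pySetD col1 c (PySem.List.pyGetD symbol_id 2 0)         -- col[c]   = symbol_id[2]
    let col3 := PySem.List.pySetD col2 (c + d) (PySem.List.pyGetD symbol_id 1 0)   -- col[c+d] = symbol_id[1]
    some (pix_column ++ col3)                                     -- pix_column.extend(col)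
  else none

-- ===== PRECONDITION & SPEC =====
-- Pre_ excludes exactly the inputs where Python A raises IndexError: when the guard holds it
-- reads symbol_id[0] and symbol_id[2], so symbol_id must have at least 3 elements then.
def Pre_from_up_and_bottom_to_center_and_center (pix_column : List Int) (height : Int) (symbol_id : List Int) (order_col : Int) : Prop :=
  (height > order_col ∧ order_col > PySem.Int.floordiv height 2) → 3 ≤ symbol_id.length
instance (pix_column : List Int) (height : Int) (symbol_id : List Int) (order_col : Int) : Decidable (Pre_from_up_and_bottom_to_center_and_center pix_column height symbol_id order_col) := by unfold Pre_from_up_and_bottom_to_center_and_center; infer_instance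

def pvWitness_from_up_and_bottom_to_center_and_center : List Int × Int × List Int × Int := ([1, 2], 5, [7, 8, 9], 4)

def Spec_from_up_and_bottom_to_center_and_center (pix_column : List Int) (height : Int) (symbol_id : List Int) (order_col : Int) (out : Option (List Int)) : Prop := out = from_up_and_bottom_to_center_and_center_alt pix_column height symbol_id order_col
instance (pix_column : List Int) (height : Int) (symbol_id : List Int) (order_col : Int) (out : Option (List Int)) : Decidable (Spec_from_up_and_bottom_to_center_and_center pix_column height symbol_id order_col out) := by unfold Spec_from_up_and_bottom_to_center_and_center; infer_instance

-- ===== CLAIM (what is proved, stated in full; the proofs are below) =====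
def Claim_equal_from_up_and_bottom_to_center_and_center : Prop := ∀ (pix_column : List Int) (height : Int) (symbol_id : List Int) (order_col : Int), Dom_from_up_and_bottom_to_center_and_center pix_column height symbol_id order_col → Pre_from_up_and_bottom_to_center_and_center pix_column height symbol_id order_col → Spec_from_up_and_bottom_to_center_and_center pix_column height symbol_id order_col (from_up_and_bottom_to_center_and_center pix_column height symbol_id order_col)

-- ===== LEMMAS AND PROOFS =====

-- the scatter column equals the conditionally built column, elementwise
theorem pv_col_eq (height order_col : Int) (a b e : Int)
    (hg : height > order_col ∧ order_col > PySem.Int.floordiv height 2) :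
    (PySem.List.pyRange 0 height 1).map (fun h =>
      if h = PySem.Int.floordiv height 2 - (height - order_col) then a
      else if h = PySem.Int.floordiv height 2 + (height - order_col) then b
      else if h = PySem.Int.floordiv height 2 then e
      else 0) =
    PySem.List.pySetD
      (PySem.List.pySetD
        (PySem.List.pySetD (List.replicate height.toNat (0 : Int))
          (PySem.Int.floordiv height 2 - (height - order_col)) a)
        (PySem.Int.floordiv height 2) e)
      (PySem.Int.floordiv height 2 + (height - order_col)) b := by
  obtain ⟨h1, h2⟩ := hg
  rw [PySem.Int.floordiv_eq_ediv_of_pos (by omega : (0:Int) < 2)] at h2 ⊢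
  rw [PySem.List.pySetD_of_nonneg _ _ (by omega : (0:Int) ≤ height / 2 - (height - order_col)),
      PySem.List.pySetD_of_nonneg _ _ (by omega : (0:Int) ≤ height / 2),
      PySem.List.pySetD_of_nonneg _ _ (by omega : (0:Int) ≤ height / 2 + (height - order_col)),
      PySem.List.pyRange_one]
  apply List.ext_getElem
  · simp only [List.length_map, List.length_range, List.length_set, List.length_replicate]
    omega
  · intro j hj hj'
    simp only [List.length_map, List.length_range] at hj
    rw [List.getElem_map, List.getElem_map, List.getElem_range,
        List.getElem_set, List.getElem_set, List.getElem_set, List.getElem_replicate]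
    split_ifs <;> omega

-- ===== VERDICT (by name: the statement is the Claim_ definition above) =====
theorem from_up_and_bottom_to_center_and_center_spec : Claim_equal_from_up_and_bottom_to_center_and_center := by
  intro pix_column height symbol_id order_col _ _
  unfold Spec_from_up_and_bottom_to_center_and_center
  unfold from_up_and_bottom_to_center_and_center from_up_and_bottom_to_center_and_center_alt
  split
  · rename_i hg
    have hfold : ∀ (l : List Int) (acc : List Int),
        l.foldl (fun acc h =>
          if h = PySem.Int.floordiv height 2 - (height - order_col) then
            acc ++ [PySem.List.pyGetD symbol_id 0 0]
          else if h = PySem.Int.floordiv height 2 + (height - order_col) then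
            acc ++ [PySem.List.pyGetD symbol_id 1 0]
          else if h = PySem.Int.floordiv height 2 then
            acc ++ [PySem.List.pyGetD symbol_id 2 0]
          else acc ++ [0]) acc =
        acc ++ l.map (fun h =>
          if h = PySem.Int.floordiv height 2 - (height - order_col) then
            PySem.List.pyGetD symbol_id 0 0
          else if h = PySem.Int.floordiv height 2 + (height - order_col) then
            PySem.List.pyGetD symbol_id 1 0
          else if h = PySem.Int.floordiv height 2 then
            PySem.List.pyGetD symbol_id 2 0
          else 0) := by
      intro l
      induction l with
      | nil => intro acc; simp
      | cons x xs ih =>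
        intro acc
        simp only [List.foldl_cons, List.map_cons]
        split_ifs <;> rw [ih] <;> simp
    rw [hfold]
    rw [pv_col_eq height order_col _ _ _ hg]
  · rfl
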